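-- pv_equiv track=rewrite | github.com/heongbin/algolithm | 괄호변환 answer.py | make_correct
-- ===== SOURCE A (Python) =====
-- def split(p):
--     check = 0
--     cnt = 0
--     for i in p:
--         if i == '(':
--             check += 1
--             cnt += 1
--             if check == 0:
--                 break
--         else:
--             check -= 1
--             cnt += 1
--             if check == 0:
--                 break
--     return p[:cnt], p[cnt:]
--
-- def is_correct(p):
--     cnt = 0
--     for i in p:
--         if cnt < 0:
--             return False
--         if i == '(':
--             cnt += 1
--         else:
--             cnt -= 1
--     return True
--
-- def make_correct(u, v):
--     ret = '(%s)' % recursion(v)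
--     for i in u[1:-1]:
--         if i == '(':
--             ret += ')'
--         else:
--             ret += '('
--
--     return ret
--
-- def recursion(p):
--     if not p:
--         return p
--     u, v = split(p)
--     if is_correct(u):
--         return u + recursion(v)
--     return make_correct(u, v)
-- ===== SOURCE B (Python) =====
-- # Iterative re-implementation: replaces the mutual recursion of A with one loop
-- # over successive balanced chunks, keeping a left accumulator and a stack of
-- # pending flipped suffixes (popped/joined in reverse at the end).
--
-- def _first_chunk(s):
--     bal = 0
--     for i, ch in enumerate(s):
--         bal += 1 if ch == '(' else -1
--         if bal == 0:
--             return s[:i + 1], s[i + 1:]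
--     return s, ''
--
-- def _prefixes_ok(s):
--     # True iff every proper prefix of s has non-negative balance
--     bal = 0
--     for ch in s[:-1]:
--         bal += 1 if ch == '(' else -1
--         if bal < 0:
--             return False
--     return True
--
-- def _flipped_suffix(u):
--     return ')' + ''.join(')' if ch == '(' else '(' for ch in u[1:-1])
--
-- def make_correct(u, v):
--     left = '('
--     stack = [_flipped_suffix(u)]
--     p = v
--     while p:
--         a, b = _first_chunk(p)
--         if _prefixes_ok(a):
--             left += a
--         else:
--             left += '('
--             stack.append(_flipped_suffix(a))
--         p = b
--     return left + ''.join(reversed(stack))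
-- ===== Notes on version B (the rewrite author's own statement) =====
-- stated objective: alternative
-- what changed: Replaced A's mutual recursion (recursion/make_correct calling each other on successive splits) with a single iterative while-loop over balanced chunks that keeps a left-string accumulator and a stack of pending flipped suffixes joined in reverse at the end; the prefix-validity and chunk-split scans are reformulated (update-then-test over s[:-1], enumerate-based first zero-balance index).
import Mathlib
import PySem

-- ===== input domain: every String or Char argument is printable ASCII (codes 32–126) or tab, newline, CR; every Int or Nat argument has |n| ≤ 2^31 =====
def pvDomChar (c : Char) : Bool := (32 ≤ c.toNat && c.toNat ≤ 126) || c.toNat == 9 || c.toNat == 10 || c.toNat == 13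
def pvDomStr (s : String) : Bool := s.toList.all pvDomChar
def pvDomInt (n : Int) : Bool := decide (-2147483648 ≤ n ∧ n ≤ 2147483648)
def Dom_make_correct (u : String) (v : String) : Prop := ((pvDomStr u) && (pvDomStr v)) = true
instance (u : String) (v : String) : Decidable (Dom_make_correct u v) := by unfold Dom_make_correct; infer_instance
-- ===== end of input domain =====

-- B replaces A's mutual recursion (recursion/make_correct) by a single iterative loop over
-- successive balanced chunks with a left accumulator and a stack of pending flipped suffixes
-- (objective: alternative decomposition, same cost).

-- ===== PORT A =====
-- split's for-loop: running check, cnt counts consumed chars, break when check hits 0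
def splitLoop : List Char → Int → Nat → Nat
  | [], _, cnt => cnt
  | c :: rest, check, cnt =>
    let check' := if c = '(' then check + 1 else check - 1
    if check' = 0 then cnt + 1 else splitLoop rest check' (cnt + 1)

-- needed for termination of the mutual ports below
theorem splitLoop_ge : ∀ (p : List Char) (check : Int) (cnt : Nat), p ≠ [] →
    cnt + 1 ≤ splitLoop p check cnt := by
  intro p
  induction p with
  | nil => intro _ _ hne; exact absurd rfl hne
  | cons c rest ih =>
    intro check cnt _
    by_cases hc : c = '(' <;>
      simp only [splitLoop, hc, reduceIte] <;>
      split <;>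
      first
        | omega
        | (rcases rest with _ | ⟨d, r⟩
           · simp [splitLoop]
           · have := ih (check + 1) (cnt + 1) (by simp); omega)
        | (rcases rest with _ | ⟨d, r⟩
           · simp [splitLoop]
           · have := ih (check - 1) (cnt + 1) (by simp); omega)

theorem drop_splitLoop_lt (p : List Char) (h : p ≠ []) :
    (p.drop (splitLoop p 0 0)).length < p.length := by
  have h1 : 1 ≤ splitLoop p 0 0 := splitLoop_ge p 0 0 h
  have h2 : 1 ≤ p.length := List.length_pos_iff.mpr h
  simp only [List.length_drop]
  omega

-- is_correct's loop: cnt tested at top of each iteration, then updated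
def isCorrectLoop : List Char → Int → Bool
  | [], _ => true
  | c :: rest, cnt =>
    if cnt < 0 then false
    else isCorrectLoop rest (if c = '(' then cnt + 1 else cnt - 1)

mutual
-- make_correct: '(' + recursion(v) + ')' then append a flipped char for each char of u[1:-1]
def makeCorrectL (u : List Char) (v : List Char) : List Char :=
  List.foldl (fun acc c => acc ++ [if c = '(' then ')' else '('])
    ('(' :: recursionL v ++ [')']) ((u.drop 1).dropLast)
termination_by (v.length, 1)
decreasing_by
  exact Prod.Lex.right _ (by omega)

def recursionL (p : List Char) : List Char :=
  if h : p = [] then p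
  else
    let n := splitLoop p 0 0
    if isCorrectLoop (p.take n) 0 then p.take n ++ recursionL (p.drop n)
    else makeCorrectL (p.take n) (p.drop n)
termination_by (p.length, 0)
decreasing_by
  · exact Prod.Lex.left _ _ (drop_splitLoop_lt p h)
  · exact Prod.Lex.left _ _ (drop_splitLoop_lt p h)
end

def make_correct (u : String) (v : String) : String :=
  String.ofList (makeCorrectL u.toList v.toList)

-- ===== PORT B =====
-- _first_chunk's scan: index (i+1) of the first position where the balance hits 0
def chunkIdx : List Char → Int → Nat → Option Nat
  | [], _, _ => none
  | c :: r, bal, i =>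
    let bal' := bal + (if c = '(' then 1 else -1)
    if bal' = 0 then some (i + 1) else chunkIdx r bal' (i + 1)

def cutLen (s : List Char) : Nat := (chunkIdx s 0 0).getD s.length

-- needed for termination of loopB
theorem chunkIdx_some_ge : ∀ (s : List Char) (bal : Int) (i n : Nat),
    chunkIdx s bal i = some n → i + 1 ≤ n := by
  intro s
  induction s with
  | nil => intro _ _ _ hn; simp [chunkIdx] at hn
  | cons c r ih =>
    intro bal i n h
    by_cases hc : c = '(' <;> simp only [chunkIdx, hc, reduceIte] at h <;>
      (split at h
       · simp only [Option.some.injEq] at h; omega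
       · have := ih _ _ _ h; omega)

theorem cutLen_pos (s : List Char) (h : s ≠ []) : 1 ≤ cutLen s := by
  unfold cutLen
  rcases hc : chunkIdx s 0 0 with _ | n
  · simpa using List.length_pos_iff.mpr h
  · simpa using chunkIdx_some_ge s 0 0 n hc

-- _prefixes_ok's loop over s[:-1]: update balance, fail as soon as it goes negative
def prefOkLoop : List Char → Int → Bool
  | [], _ => true
  | c :: r, bal =>
    let bal' := bal + (if c = '(' then 1 else -1)
    if bal' < 0 then false else prefOkLoop r bal'

-- _flipped_suffix: ')' followed by every char of u[1:-1] flipped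
def flippedSuffix (u : List Char) : List Char :=
  ')' :: ((u.drop 1).dropLast).map (fun c => if c = '(' then ')' else '(')

-- the while loop of B's make_correct
def loopB (p : List Char) (left : List Char) (stack : List (List Char)) : List Char :=
  if h : p = [] then left ++ stack.reverse.flatten
  else
    let n := cutLen p
    if prefOkLoop (p.take n).dropLast 0 then loopB (p.drop n) (left ++ p.take n) stack
    else loopB (p.drop n) (left ++ ['(']) (stack ++ [flippedSuffix (p.take n)])
termination_by p.length
decreasing_by
  all_goals
    simp only [List.length_drop]
    have := cutLen_pos p h
    have : 1 ≤ p.length := List.length_pos_iff.mpr h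
    omega

def make_correct_alt (u : String) (v : String) : String :=
  String.ofList (loopB v.toList ['('] [flippedSuffix u.toList])

-- ===== PRECONDITION & SPEC =====
def Spec_make_correct (u : String) (v : String) (out : String) : Prop := out = make_correct_alt u v
instance (u : String) (v : String) (out : String) : Decidable (Spec_make_correct u v out) := by unfold Spec_make_correct; infer_instance

-- ===== CLAIM (what is proved, stated in full; the proofs are below) =====
def Claim_equal_make_correct : Prop := ∀ (u : String) (v : String), Dom_make_correct u v → Spec_make_correct u v (make_correct u v)

-- ===== LEMMAS AND PROOFS =====

-- A's char-by-char foldl append equals [')'] ++ map flip (B's suffix shape)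
theorem foldl_append_map (g : Char → Char) :
    ∀ (l : List Char) (init : List Char),
    List.foldl (fun acc c => acc ++ [g c]) init l = init ++ l.map g := by
  intro l
  induction l with
  | nil => intro init; simp
  | cons c r ih => intro init; simp [List.foldl, ih]

-- B's chunk index equals A's split count
theorem chunkIdx_eq_splitLoop : ∀ (s : List Char) (bal : Int) (i : Nat),
    (chunkIdx s bal i).getD (i + s.length) = splitLoop s bal i := by
  intro s
  induction s with
  | nil => intro bal i; simp [chunkIdx, splitLoop]
  | cons c r ih =>
    intro bal i
    by_cases hc : c = '('
    · simp only [chunkIdx, splitLoop, hc, reduceIte]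
      split
      · simp
      · simp only [List.length_cons, show i + (r.length + 1) = (i + 1) + r.length from by omega]
        exact ih (bal + 1) (i + 1)
    · simp only [chunkIdx, splitLoop, hc, reduceIte, Int.sub_eq_add_neg]
      split
      · simp
      · simp only [List.length_cons, show i + (r.length + 1) = (i + 1) + r.length from by omega]
        exact ih (bal + -1) (i + 1)

theorem cutLen_eq (s : List Char) : cutLen s = splitLoop s 0 0 := by
  have := chunkIdx_eq_splitLoop s 0 0
  simpa [cutLen] using this

-- B's proper-prefix check equals A's is_correct loop (for a non-negative start)
theorem prefOk_eq_isCorrect : ∀ (s : List Char) (cnt : Int), 0 ≤ cnt →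
    prefOkLoop s.dropLast cnt = isCorrectLoop s cnt := by
  intro s
  induction s with
  | nil => intro cnt _; simp [prefOkLoop, isCorrectLoop]
  | cons c r ih =>
    intro cnt hcnt
    rcases r with _ | ⟨d, r'⟩
    · simp [prefOkLoop, isCorrectLoop, not_lt.mpr hcnt]
    · have hdl : (c :: d :: r').dropLast = c :: (d :: r').dropLast := by simp
      rw [hdl]
      simp only [prefOkLoop, isCorrectLoop, not_lt.mpr hcnt]
      have hbal : cnt + (if c = '(' then 1 else -1) = (if c = '(' then cnt + 1 else cnt - 1) := by
        split <;> ring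
      rw [hbal]
      by_cases hneg : (if c = '(' then cnt + 1 else cnt - 1) < 0
      · rw [if_pos hneg]
        simp [hneg]
      · rw [if_neg hneg]
        exact ih _ (not_lt.mp hneg)

-- the loop invariant: B's loop with accumulator `left` and pending stack computes
-- left ++ recursion(p) ++ (stack joined in reverse)
theorem loopB_eq_rec : ∀ (k : Nat) (p : List Char), p.length ≤ k → ∀ (left : List Char) (stack : List (List Char)),
    loopB p left stack = left ++ recursionL p ++ stack.reverse.flatten := by
  intro k
  induction k with
  | zero =>
    intro p hp left stack
    have : p = [] := List.length_eq_zero_iff.mp (Nat.le_zero.mp hp)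
    subst this
    rw [loopB, recursionL]
    simp
  | succ k ih =>
    intro p hp left stack
    by_cases h : p = []
    · subst h
      rw [loopB, recursionL]
      simp
    · rw [loopB, recursionL]
      simp only [h, reduceDIte]
      rw [cutLen_eq]
      set n := splitLoop p 0 0 with hn
      have hlt : (p.drop n).length < p.length := drop_splitLoop_lt p h
      have hle : (p.drop n).length ≤ k := by omega
      rw [prefOk_eq_isCorrect (p.take n) 0 (le_refl 0)]
      by_cases hc : isCorrectLoop (p.take n) 0 = true
      · rw [if_pos hc, if_pos hc, ih _ hle]
        simp
      · rw [if_neg hc, if_neg hc, ih _ hle]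
        rw [makeCorrectL, foldl_append_map]
        simp [flippedSuffix]

-- ===== VERDICT (by name: the statement is the Claim_ definition above) =====
theorem make_correct_spec : Claim_equal_make_correct := by
  intro u v _
  show make_correct u v = make_correct_alt u v
  unfold make_correct make_correct_alt
  rw [loopB_eq_rec (v.toList.length) v.toList (le_refl _)]
  rw [makeCorrectL, foldl_append_map]
  simp [flippedSuffix]
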